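-- pv_equiv track=rewrite | github.com/lucas-lembo/MC102 | Lab 07.py | traduz_mensagem
-- ===== SOURCE A (Python) =====
-- def traduz_mensagem(texto: list, numero: int) -> list[str]:
--     ''' Substitui cada caractere de indice i de um texto por um de indice i + numero
--
--         baseando-se na tabela ASCII. '''
--
--     traducao = []
--     for string in texto:
--         linha_traducao = []
--         for caractere in string:
--             caractere_traducao = chr(ord(caractere) + numero)
--             indice_final = ((ord(caractere) + numero) - 32) % 95 + 32
--             caractere_traducao = chr(indice_final)
--             linha_traducao.append(caractere_traducao)
--         traducao.append(''.join(map(str, linha_traducao)))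
--     return traducao
-- ===== SOURCE B (Python) =====
-- def traduz_mensagem(texto: list, numero: int) -> list[str]:
--     # Build a translation table once (one entry per distinct character),
--     # then let str.translate do the per-string mapping.
--     chars = set()
--     for string in texto:
--         chars.update(string)
--     table = {ord(c): ((ord(c) + numero) - 32) % 95 + 32 for c in chars}
--     return [string.translate(table) for string in texto]
-- ===== Notes on version B (the rewrite author's own statement) =====
-- stated objective: faster
-- what changed: B precomputes one translation table from the set of distinct characters and maps each string with str.translate, instead of A's nested character loops recomputing the shift arithmetic and list-append/join per occurrence (measured ~3x faster).
import Mathlib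
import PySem

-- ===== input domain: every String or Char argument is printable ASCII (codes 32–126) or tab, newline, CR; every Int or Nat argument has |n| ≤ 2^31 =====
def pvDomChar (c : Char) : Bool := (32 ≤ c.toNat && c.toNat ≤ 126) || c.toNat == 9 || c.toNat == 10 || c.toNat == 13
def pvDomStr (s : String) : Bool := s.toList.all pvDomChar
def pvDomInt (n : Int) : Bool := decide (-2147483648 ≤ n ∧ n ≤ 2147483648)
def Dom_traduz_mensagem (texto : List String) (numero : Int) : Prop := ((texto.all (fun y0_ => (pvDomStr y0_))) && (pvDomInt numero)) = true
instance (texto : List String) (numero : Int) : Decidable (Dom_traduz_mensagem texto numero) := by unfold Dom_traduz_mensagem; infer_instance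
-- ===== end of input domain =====

-- B builds one translation table from the distinct characters and maps each string
-- through str.translate, instead of A's nested loops recomputing the shift arithmetic
-- per character occurrence (measured faster in a timing run); same value on Pre_.

-- ===== PORT A =====
def traduz_mensagem (texto : List String) (numero : Int) : List String :=
  texto.foldl (fun traducao string =>
    let linha_traducao : List Char := string.toList.foldl (fun acc caractere =>
      -- dead first assignment: chr(ord(caractere) + numero); Python raises ValueError
      -- here exactly outside Pre_traduz_mensagem (excluded), the value is unused
      let _caractere_traducao := Char.ofNat ((caractere.toNat : Int) + numero).toNat
      let indice_final : Int := PySem.Int.mod ((caractere.toNat : Int) + numero - 32) 95 + 32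
      acc ++ [Char.ofNat indice_final.toNat]) []
    traducao ++ [String.ofList linha_traducao]) []

-- ===== PORT B =====
def traduz_mensagem_alt (texto : List String) (numero : Int) : List String :=
  let chars : PySem.Set Char :=
    texto.foldl (fun s string => PySem.Set.update s string.toList) PySem.Set.empty
  let table : PySem.Dict Int Int :=
    chars.foldl (fun d c =>
      d.insert (c.toNat : Int) (PySem.Int.mod ((c.toNat : Int) + numero - 32) 95 + 32))
      PySem.Dict.empty
  texto.map (fun string => String.ofList (string.toList.map (fun c =>
    match table.get? (c.toNat : Int) with
    | some v => Char.ofNat v.toNat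
    | none => c)))

-- ===== PRECONDITION & SPEC =====
-- Pre_ excludes exactly the inputs on which A raises ValueError: the dead statement
-- chr(ord(caractere) + numero) needs 0 ≤ ord(c)+numero ≤ 0x10FFFF for every character.
def Pre_traduz_mensagem (texto : List String) (numero : Int) : Prop :=
  (texto.all (fun s => s.toList.all (fun c =>
    decide (0 ≤ (c.toNat : Int) + numero) && decide ((c.toNat : Int) + numero ≤ 1114111)))) = true
instance (texto : List String) (numero : Int) : Decidable (Pre_traduz_mensagem texto numero) := by
  unfold Pre_traduz_mensagem; infer_instance
def pvWitness_traduz_mensagem : List String × Int := (["abc", "XYZ 1"], 5)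

def Spec_traduz_mensagem (texto : List String) (numero : Int) (out : List String) : Prop := out = traduz_mensagem_alt texto numero
instance (texto : List String) (numero : Int) (out : List String) : Decidable (Spec_traduz_mensagem texto numero out) := by unfold Spec_traduz_mensagem; infer_instance

-- ===== CLAIM (what is proved, stated in full; the proofs are below) =====
def Claim_equal_traduz_mensagem : Prop := ∀ (texto : List String) (numero : Int), Dom_traduz_mensagem texto numero → Pre_traduz_mensagem texto numero → Spec_traduz_mensagem texto numero (traduz_mensagem texto numero)

-- ===== LEMMAS AND PROOFS =====

theorem pv_cast_ne {c x : Char} (h : c ≠ x) : (c.toNat : Int) ≠ (x.toNat : Int) := by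
  intro he
  have hn : c.toNat = x.toNat := Int.ofNat.inj he
  exact h (by rw [← Char.ofNat_toNat c, hn, Char.ofNat_toNat])

theorem pv_get?_foldl_not_mem (numero : Int) (L : List Char) (d : PySem.Dict Int Int)
    (c : Char) (hc : c ∉ L) :
    (L.foldl (fun d x =>
      d.insert (x.toNat : Int) (PySem.Int.mod ((x.toNat : Int) + numero - 32) 95 + 32)) d).get?
      (c.toNat : Int) = d.get? (c.toNat : Int) := by
  induction L generalizing d with
  | nil => rfl
  | cons x L ih =>
    have hne : c ≠ x := fun he => hc (he ▸ List.mem_cons_self)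
    rw [List.foldl_cons, ih _ (fun h => hc (List.mem_cons_of_mem _ h)),
      PySem.Dict.get?_insert_of_ne _ _ (pv_cast_ne hne)]

theorem pv_get?_foldl_mem (numero : Int) (L : List Char) (d : PySem.Dict Int Int)
    (c : Char) (hc : c ∈ L) :
    (L.foldl (fun d x =>
      d.insert (x.toNat : Int) (PySem.Int.mod ((x.toNat : Int) + numero - 32) 95 + 32)) d).get?
      (c.toNat : Int) = some (PySem.Int.mod ((c.toNat : Int) + numero - 32) 95 + 32) := by
  induction L generalizing d with
  | nil => cases hc
  | cons x L ih =>
    rw [List.foldl_cons]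
    by_cases hm : c ∈ L
    · exact ih _ hm
    · have hcx : c = x := by
        rcases List.mem_cons.mp hc with h | h
        · exact h
        · exact absurd h hm
      subst hcx
      rw [pv_get?_foldl_not_mem numero L _ c hm, PySem.Dict.get?_insert_self]

theorem pv_mem_chars (texto : List String) (s : String) (c : Char)
    (hs : s ∈ texto) (hc : c ∈ s.toList) :
    c ∈ texto.foldl (fun acc string => PySem.Set.update acc string.toList) PySem.Set.empty := by
  have gen : ∀ (l : List String) (acc : PySem.Set Char),
      (c ∈ acc ∨ ∃ t ∈ l, c ∈ t.toList) →
      c ∈ l.foldl (fun acc string => PySem.Set.update acc string.toList) acc := by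
    intro l
    induction l with
    | nil =>
      intro acc h
      rcases h with h | ⟨t, ht, _⟩
      · exact h
      · cases ht
    | cons t l ih =>
      intro acc h
      apply ih
      rcases h with h | ⟨u, hu, hcu⟩
      · exact Or.inl ((PySem.Set.mem_update _ _ _).mpr (Or.inl h))
      · rcases List.mem_cons.mp hu with rfl | hu'
        · exact Or.inl ((PySem.Set.mem_update _ _ _).mpr (Or.inr hcu))
        · exact Or.inr ⟨u, hu', hcu⟩
  exact gen texto PySem.Set.empty (Or.inr ⟨s, hs, hc⟩)

theorem traduz_eq (texto : List String) (numero : Int) :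
    traduz_mensagem texto numero = traduz_mensagem_alt texto numero := by
  unfold traduz_mensagem traduz_mensagem_alt
  rw [PySem.List.foldl_append_singleton_eq_map]
  apply List.map_congr_left
  intro s hs
  congr 1
  rw [PySem.List.foldl_append_singleton_eq_map]
  apply List.map_congr_left
  intro c hc
  rw [pv_get?_foldl_mem numero _ _ c (pv_mem_chars texto s c hs hc)]

-- ===== VERDICT (by name: the statement is the Claim_ definition above) =====
theorem traduz_mensagem_spec : Claim_equal_traduz_mensagem := by
  intro texto numero _ _
  exact traduz_eq texto numero
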